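-- pv_equiv track=rewrite | github.com/baiwan-chenhao/rewrite | leetcode_gen_week3.py | solve
-- ===== SOURCE A (Python) =====
-- def solve(s: str, numOps: int) -> int:
--     from heapq import heapify, heapreplace
--     from itertools import groupby
--     cnt = sum((ord(b) ^ i) & 1 for i, b in enumerate(s))
--     if min(cnt, len(s) - cnt) <= numOps:
--         return 1
--
--     g = (list(t) for _, t in groupby(s))
--     # 子串操作后的最长子段长度，原始子串长度，段数
--     h = [(-k, k, 1) for k in map(len, g)]
--     heapify(h)
--     for _ in range(numOps):
--         max_seg, k, seg = h[0]
--         if max_seg == -2: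
--             return 2
--         heapreplace(h, (-(k // (seg + 1)), k, seg + 1))  # 重新分割
--     return -h[0][0]
-- ===== SOURCE B (Python) =====
-- def solve(s: str, numOps: int) -> int:
--     from itertools import groupby
--     cnt = sum((ord(b) ^ i) & 1 for i, b in enumerate(s))
--     if min(cnt, len(s) - cnt) <= numOps:
--         return 1
--     runs = [len(list(t)) for _, t in groupby(s)]
--     m = max(runs)
--     if m <= 2:
--         return m
--     # binary-search the least target length L in [2, m] whose total split
--     # cost sum(k // (L + 1)) fits in numOps
--     lo, hi = 2, m
--     while lo < hi:
--         mid = (lo + hi) // 2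
--         if sum(k // (mid + 1) for k in runs) <= numOps:
--             hi = mid
--         else:
--             lo = mid + 1
--     return lo
-- ===== Notes on version B (the rewrite author's own statement) =====
-- stated objective: alternative
-- what changed: Replaces the heap-based greedy that performs numOps splits one at a time with a binary search over the answer length L using the closed-form per-run split cost k // (L+1).
-- intended difference: On non-binary strings that enter the loop (numOps < min(cnt, n-cnt)) while every run has length 1 or 3, some run has length 3 and the total split cost sum(k//2) fits in numOps, A's greedy skips the value 2 (3//2 = 1) and returns 1 while B returns 2, the floor that A's own early-return otherwise enforces; such inputs cannot be valid binary instances, where the region is empty, so B's uniform floor of 2 is an equally valid choice on this unspecified corner. — e.g. on solve("000bbb", 2): A returns 1, B returns 2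
import Mathlib
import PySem

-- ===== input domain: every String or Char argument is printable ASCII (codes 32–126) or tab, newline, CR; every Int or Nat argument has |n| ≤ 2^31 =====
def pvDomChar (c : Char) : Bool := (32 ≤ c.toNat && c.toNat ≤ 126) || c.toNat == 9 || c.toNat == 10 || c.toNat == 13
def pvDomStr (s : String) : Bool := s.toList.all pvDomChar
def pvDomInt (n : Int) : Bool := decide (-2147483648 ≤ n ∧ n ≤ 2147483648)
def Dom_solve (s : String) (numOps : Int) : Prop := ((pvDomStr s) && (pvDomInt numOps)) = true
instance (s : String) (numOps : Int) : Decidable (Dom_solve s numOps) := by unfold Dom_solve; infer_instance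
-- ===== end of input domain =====

-- B replaces A's heap greedy (numOps single splits) by a binary search over the answer
-- length L with the closed-form per-run split cost k // (L+1); return value only, no mutation.

-- ===== PORT A =====
abbrev Tri : Type := Int × Int × Int

-- Python tuple comparison (lexicographic <) on the heap triples
def triLt (a b : Tri) : Bool :=
  decide (a.1 < b.1 ∨ (a.1 = b.1 ∧ (a.2.1 < b.2.1 ∨ (a.2.1 = b.2.1 ∧ a.2.2 < b.2.2))))

def hget (h : List Tri) (i : Nat) : Tri := h.getD i (0, 0, 0)

def hswap (h : List Tri) (i j : Nat) : List Tri := (h.set i (hget h j)).set j (hget h i)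

-- bubble-up of the element at index j (sift towards the root); fuel only bounds the
-- number of steps (j strictly decreases), it never changes the result
def siftUp : Nat → List Tri → Nat → List Tri
  | 0, h, _ => h
  | fuel + 1, h, j =>
    if j = 0 then h
    else if triLt (hget h j) (hget h ((j - 1) / 2)) then
      siftUp fuel (hswap h ((j - 1) / 2) j) ((j - 1) / 2)
    else h

-- heapq.heappush: append then bubble up
def hpush (h : List Tri) (x : Tri) : List Tri := siftUp h.length (h ++ [x]) h.length

-- heapq.heapify: build a binary min-heap from the list
def heapify (l : List Tri) : List Tri := l.foldl hpush []

-- sift-down of the element at index i (swap with the smaller child while out of order);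
-- fuel only bounds the number of steps, it never changes the result
-- index of the smaller child of i (right child only if it exists and is smaller)
def childSel (h : List Tri) (i : Nat) : Nat :=
  if 2 * i + 2 < h.length ∧ triLt (hget h (2 * i + 2)) (hget h (2 * i + 1)) = true
  then 2 * i + 2 else 2 * i + 1

def siftDown : Nat → List Tri → Nat → List Tri
  | 0, h, _ => h
  | fuel + 1, h, i =>
    if 2 * i + 1 < h.length then
      if triLt (hget h (childSel h i)) (hget h i) then
        siftDown fuel (hswap h i (childSel h i)) (childSel h i)
      else h
    else h

-- heapq.heapreplace: overwrite the root, then sift it down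
def heapreplace (h : List Tri) (x : Tri) : List Tri := siftDown h.length (h.set 0 x) 0

-- sum((ord(b) ^ i) & 1 for i, b in enumerate(s))
def cntAux (i : Nat) : List Char → Nat
  | [] => 0
  | c :: r => ((c.toNat ^^^ i) &&& 1) + cntAux (i + 1) r

-- run lengths: [len(list(t)) for _, t in groupby(s)] (fuel = list length)
def runLensF : Nat → List Char → List Int
  | _, [] => []
  | 0, _ :: _ => []
  | fuel + 1, c :: r =>
      (1 + ((r.takeWhile (· == c)).length : Int)) :: runLensF fuel (r.dropWhile (· == c))

def runLens (l : List Char) : List Int := runLensF l.length l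

-- the for-loop over range(numOps) with its two early returns
def loopA : Nat → List Tri → Int
  | 0, h => -(hget h 0).1
  | fuel + 1, h =>
    let e := hget h 0
    if e.1 = -2 then 2
    else loopA fuel (heapreplace h (-(PySem.Int.floordiv e.2.1 (e.2.2 + 1)), e.2.1, e.2.2 + 1))

def solve (s : String) (numOps : Int) : Int :=
  let cnt : Int := (cntAux 0 s.toList : Nat)
  if min cnt (PySem.Str.len s - cnt) ≤ numOps then 1
  else
    let h := heapify ((runLens s.toList).map (fun k => (-k, k, 1)))
    loopA numOps.toNat h

-- ===== PORT B =====
def cntB (i : Nat) : List Char → Nat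
  | [] => 0
  | c :: r => ((c.toNat ^^^ i) &&& 1) + cntB (i + 1) r

def runLensBF : Nat → List Char → List Int
  | _, [] => []
  | 0, _ :: _ => []
  | fuel + 1, c :: r =>
      (1 + ((r.takeWhile (· == c)).length : Int)) :: runLensBF fuel (r.dropWhile (· == c))

def runLensB (l : List Char) : List Int := runLensBF l.length l

-- while lo < hi: mid = (lo+hi)//2; feasible(mid) -> hi = mid else lo = mid+1
-- (fuel = hi - lo bounds the number of iterations, it never changes the result)
def bisF (runs : List Int) (numOps : Int) : Nat → Int → Int → Int
  | 0, lo, _ => lo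
  | fuel + 1, lo, hi =>
    if lo < hi then
      let mid := PySem.Int.floordiv (lo + hi) 2
      if (runs.map (fun k => PySem.Int.floordiv k (mid + 1))).sum ≤ numOps
      then bisF runs numOps fuel lo mid
      else bisF runs numOps fuel (mid + 1) hi
    else lo

def bisB (runs : List Int) (numOps : Int) (lo hi : Int) : Int :=
  bisF runs numOps (hi - lo).toNat lo hi

def solve_alt (s : String) (numOps : Int) : Int :=
  let cnt : Int := (cntB 0 s.toList : Nat)
  if min cnt (PySem.Str.len s - cnt) ≤ numOps then 1
  else
    let runs := runLensB s.toList
    let m := match PySem.List.max? runs (fun x => x) with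
             | some v => v
             | none => 0
    if m ≤ 2 then m else bisB runs numOps 2 m

-- ===== PRECONDITION & SPEC =====
-- Pre_ excludes only (s = "", numOps < 0), where A raises IndexError (h[0] on the empty
-- heap) and B raises ValueError (max of an empty sequence); neither returns there.
def Pre_solve (s : String) (numOps : Int) : Prop := ¬(s = "" ∧ numOps < 0)
instance (s : String) (numOps : Int) : Decidable (Pre_solve s numOps) := by
  unfold Pre_solve; infer_instance

def pvWitness_solve : String × Int := ("00110", 0)

-- helpers for D_ (input inspection only: run-length encoding and the mismatch count,
-- written independently of the ports: foldr RLE and a parity filter over zipIdx)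
def dRuns (l : List Char) : List Nat := (l.splitBy (· == ·)).map List.length

def dCnt (s : String) : Int :=
  ((s.toList.zipIdx.countP (fun p => (p.1.toNat + p.2) % 2 = 1) : Nat) : Int)

-- On non-binary strings that enter the loop (numOps < min(cnt, n-cnt)) while every run has
-- length 1 or 3, some run has length 3, and the total split cost sum(k//2) = (#runs of
-- length 3) fits in numOps, A's greedy splits each 3 straight past 2 (3//2 = 1) and returns
-- 1, while B returns 2, the floor that A's own early-return otherwise enforces; no valid
-- binary instance lies in this region, so B's uniform floor of 2 is an equally valid
-- choice on this unspecified corner.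
def D_solve (s : String) (numOps : Int) : Prop :=
  ¬(min (dCnt s) ((s.toList.length : Int) - dCnt s) ≤ numOps) ∧
  (∀ k ∈ dRuns s.toList, k = 1 ∨ k = 3) ∧ (3 ∈ dRuns s.toList) ∧
  (((dRuns s.toList).count 3 : Int) ≤ numOps)
instance (s : String) (numOps : Int) : Decidable (D_solve s numOps) := by
  unfold D_solve; infer_instance

def Spec_solve (s : String) (numOps : Int) (out : Int) : Prop :=
  ¬ D_solve s numOps → out = solve_alt s numOps
instance (s : String) (numOps : Int) (out : Int) : Decidable (Spec_solve s numOps out) := by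
  unfold Spec_solve; infer_instance

def pvDiffWitness_solve : String × Int := ("000bbb", 2)
def pvDiffWitnessOut_solve : Int × Int := (1, 2)

-- ===== CLAIM =====
def Claim_unchanged_solve : Prop := ∀ (s : String) (numOps : Int), Dom_solve s numOps → Pre_solve s numOps → Spec_solve s numOps (solve s numOps)
def Claim_changed_solve : Prop := Dom_solve (pvDiffWitness_solve.1) (pvDiffWitness_solve.2) ∧ Pre_solve (pvDiffWitness_solve.1) (pvDiffWitness_solve.2) ∧ D_solve (pvDiffWitness_solve.1) (pvDiffWitness_solve.2) ∧ solve (pvDiffWitness_solve.1) (pvDiffWitness_solve.2) = pvDiffWitnessOut_solve.1 ∧ solve_alt (pvDiffWitness_solve.1) (pvDiffWitness_solve.2) = pvDiffWitnessOut_solve.2 ∧ pvDiffWitnessOut_solve.1 ≠ pvDiffWitnessOut_solve.2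
def Claim_exact_solve : Prop := ∀ (s : String) (numOps : Int), Dom_solve s numOps → Pre_solve s numOps → D_solve s numOps → solve s numOps ≠ solve_alt s numOps

-- ===== LEMMAS AND PROOFS =====
theorem hswap_length (h : List Tri) (i j : Nat) : (hswap h i j).length = h.length := by
  simp [hswap]

-- ---- order lemmas for triLt ----
theorem triLt_irrefl (a : Tri) : triLt a a = false := by simp [triLt]

theorem triLt_asymm {a b : Tri} (h : triLt a b = true) : triLt b a = false := by
  simp only [triLt, decide_eq_true_eq, decide_eq_false_iff_not] at h ⊢; omega

theorem triLt_ff_trans {a b c : Tri} (h1 : triLt a b = false) (h2 : triLt b c = false) :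
    triLt a c = false := by
  simp only [triLt, decide_eq_false_iff_not] at h1 h2 ⊢; omega

theorem triLt_lt_ff {a b c : Tri} (h1 : triLt b c = true) (h2 : triLt a c = false) :
    triLt a b = false := by
  simp only [triLt, decide_eq_true_eq, decide_eq_false_iff_not] at h1 h2 ⊢; omega

-- ---- hget / set / swap lemmas ----
theorem hget_eq_getElem {h : List Tri} {i : Nat} (hi : i < h.length) : hget h i = h[i] := by
  simp [hget, List.getD_eq_getElem?_getD, List.getElem?_eq_getElem hi]

theorem hget_set_eq {h : List Tri} {i : Nat} {x : Tri} (hi : i < h.length) :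
    hget (h.set i x) i = x := by
  simp [hget, List.getD_eq_getElem?_getD, List.getElem?_set_self hi]

theorem hget_set_ne {h : List Tri} {i j : Nat} {x : Tri} (hij : i ≠ j) :
    hget (h.set i x) j = hget h j := by
  simp [hget, List.getD_eq_getElem?_getD, List.getElem?_set_ne hij]

theorem hget_swap_fst {h : List Tri} {i j : Nat} (hij : i ≠ j) (hi : i < h.length) :
    hget (hswap h i j) i = hget h j := by
  rw [hswap, hget_set_ne (Ne.symm hij), hget_set_eq hi]

theorem hget_swap_snd {h : List Tri} {i j : Nat} (hj : j < h.length) :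
    hget (hswap h i j) j = hget h i := by
  rw [hswap, hget_set_eq (by simpa using hj)]

theorem hget_swap_other {h : List Tri} {i j d : Nat} (hdi : d ≠ i) (hdj : d ≠ j) :
    hget (hswap h i j) d = hget h d := by
  rw [hswap, hget_set_ne (Ne.symm hdj), hget_set_ne (Ne.symm hdi)]

theorem cons_set_perm {α : Type} (d : α) : ∀ (t : List α) (k : Nat), k < t.length → ∀ (a : α),
    ((t.getD k d) :: t.set k a).Perm (a :: t) := by
  intro t
  induction t with
  | nil => intro k hk; simp at hk
  | cons b r ih =>
    intro k hk a
    cases k with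
    | zero => simpa using List.Perm.swap a b r
    | succ k =>
      have hk' : k < r.length := by simpa using hk
      have e : ((b :: r).getD (k+1) d :: (b :: r).set (k+1) a)
          = r.getD k d :: b :: r.set k a := by simp
      rw [e]
      exact (List.Perm.swap b _ _).trans (((ih k hk' a).cons b).trans (List.Perm.swap a b r))

theorem hswap_perm {h : List Tri} {i j : Nat} (hi : i < h.length) (hj : j < h.length) :
    (hswap h i j).Perm h := by
  by_cases hij : i = j
  · subst hij
    have : hget h i = h[i] := hget_eq_getElem hi
    rw [hswap, this, List.set_getElem_self, List.set_getElem_self]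
  · -- reduce to cons_set_perm by peeling the smaller index
    -- general double-set permutation, by induction on h generalizing i j
    clear hij
    induction h generalizing i j with
    | nil => simp at hi
    | cons c r ih =>
      match i, j with
      | 0, 0 => simp [hswap, hget]
      | 0, k+1 =>
        have hk : k < r.length := by simpa using hj
        have : hswap (c :: r) 0 (k+1) = (r.getD k (0,0,0)) :: r.set k c := by
          simp [hswap, hget]
        rw [this]
        exact cons_set_perm _ r k hk c
      | k+1, 0 =>
        have hk : k < r.length := by simpa using hi
        have : hswap (c :: r) (k+1) 0 = (r.getD k (0,0,0)) :: r.set k c := by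
          simp [hswap, hget]
        rw [this]
        exact cons_set_perm _ r k hk c
      | a+1, b+1 =>
        have ha : a < r.length := by simpa using hi
        have hb : b < r.length := by simpa using hj
        have : hswap (c :: r) (a+1) (b+1) = c :: hswap r a b := by
          simp [hswap, hget]
        rw [this]
        exact (ih ha hb).cons c

theorem siftUp_perm : ∀ (f : Nat) (h : List Tri) (j : Nat), j < h.length →
    (siftUp f h j).Perm h := by
  intro f
  induction f with
  | zero => intro h j _; exact List.Perm.refl h
  | succ f ih =>
    intro h j hj
    rw [siftUp]
    split
    · exact List.Perm.refl h
    · next hj0 =>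
      split
      · have hp : (j - 1) / 2 < h.length := by omega
        have hswl : (hswap h ((j-1)/2) j).length = h.length := hswap_length ..
        exact ((ih _ _ (by omega)).trans (hswap_perm hp hj))
      · exact List.Perm.refl h

theorem hpush_perm (h : List Tri) (x : Tri) : (hpush h x).Perm (x :: h) := by
  have h1 : (siftUp h.length (h ++ [x]) h.length).Perm (h ++ [x]) :=
    siftUp_perm _ _ _ (by simp)
  exact h1.trans (List.perm_append_singleton x h)

theorem foldl_hpush_perm : ∀ (l acc : List Tri), (l.foldl hpush acc).Perm (acc ++ l) := by
  intro l
  induction l with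
  | nil => intro acc; simp
  | cons x r ih =>
    intro acc
    have h1 : (r.foldl hpush (hpush acc x)).Perm ((hpush acc x) ++ r) := ih _
    have h2 : ((hpush acc x) ++ r).Perm ((x :: acc) ++ r) :=
      (hpush_perm acc x).append_right r
    simp only [List.foldl_cons]
    exact (h1.trans h2).trans (by simpa using List.perm_middle.symm)

theorem heapify_perm (l : List Tri) : (heapify l).Perm l := by
  simpa using foldl_hpush_perm l []

theorem siftDown_perm : ∀ (f : Nat) (h : List Tri) (i : Nat), (siftDown f h i).Perm h := by
  intro f
  induction f with
  | zero => intro h i; exact List.Perm.refl h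
  | succ f ih =>
    intro h i
    rw [siftDown]
    split
    · next hc =>
      split
      · refine (ih _ _).trans (hswap_perm (by omega) ?_)
        unfold childSel
        split <;> omega
      · exact List.Perm.refl h
    · exact List.Perm.refl h

theorem set_zero_eq_cons {h : List Tri} (hne : h ≠ []) (x : Tri) :
    h.set 0 x = x :: h.tail := by
  cases h with
  | nil => exact absurd rfl hne
  | cons a t => rfl

theorem heapreplace_perm {h : List Tri} (hne : h ≠ []) (x : Tri) :
    (heapreplace h x).Perm (x :: h.tail) := by
  have h1 : (heapreplace h x).Perm (h.set 0 x) := siftDown_perm _ _ _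
  rwa [set_zero_eq_cons hne x] at h1


-- ---- heap property ----
def HeapProp (h : List Tri) : Prop :=
  ∀ j, 0 < j → j < h.length → triLt (hget h j) (hget h ((j - 1) / 2)) = false

theorem heap_root_min {h : List Tri} (HH : HeapProp h) :
    ∀ i, i < h.length → triLt (hget h i) (hget h 0) = false := by
  intro i
  induction i using Nat.strong_induction_on with
  | _ i ih =>
    intro hi
    rcases Nat.eq_zero_or_pos i with h0 | h0
    · subst h0; exact triLt_irrefl _
    · exact triLt_ff_trans (HH i h0 hi) (ih ((i - 1) / 2) (by omega) (by omega))

theorem heap_root_min_mem {h : List Tri} (HH : HeapProp h) {e : Tri} (he : e ∈ h) :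
    triLt e (hget h 0) = false := by
  obtain ⟨i, hi, rfl⟩ := List.mem_iff_getElem.mp he
  rw [← hget_eq_getElem hi]
  exact heap_root_min HH i hi

theorem siftUp_heap : ∀ (f : Nat) (h : List Tri) (j : Nat), j ≤ f → j < h.length →
    (∀ i, 0 < i → i < h.length → i ≠ j → triLt (hget h i) (hget h ((i - 1) / 2)) = false) →
    (∀ c, c < h.length → (c - 1) / 2 = j → 0 < j →
      triLt (hget h c) (hget h ((j - 1) / 2)) = false) →
    HeapProp (siftUp f h j) := by
  intro f
  induction f with
  | zero =>
    intro h j hjf _ B1 _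
    have hj0 : j = 0 := by omega
    subst hj0
    intro i hi0 hil
    exact B1 i hi0 hil (by omega)
  | succ f ih =>
    intro h j hjf hjl B1 B2
    rw [siftUp]
    by_cases hj0 : j = 0
    · simp only [hj0, if_true]
      intro i hi0 hil
      exact B1 i hi0 hil (by omega)
    · simp only [hj0, if_false]
      set p := (j - 1) / 2 with hp
      have hpj : p < j := by omega
      have hpl : p < h.length := by omega
      by_cases hlt : triLt (hget h j) (hget h p) = true
      · simp only [hlt, if_true]
        have hswl : (hswap h p j).length = h.length := hswap_length ..
        apply ih _ p (by omega) (by omega)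
        · -- B1 for the swapped list at p
          intro i hi0 hil hip
          rw [hswl] at hil
          by_cases hij : i = j
          · subst hij
            rw [hget_swap_snd hjl, hp, hget_swap_fst (by omega) hpl]
            exact triLt_asymm hlt
          · by_cases hpar_j : (i - 1) / 2 = j
            · rw [hget_swap_other hip hij, hpar_j, hget_swap_snd hjl]
              exact B2 i hil hpar_j (by omega)
            · by_cases hpar_p : (i - 1) / 2 = p
              · rw [hget_swap_other hip hij, hpar_p, hget_swap_fst (by omega) hpl]
                have hib : triLt (hget h i) (hget h p) = false := by
                  have := B1 i hi0 hil hij; rwa [hpar_p] at this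
                exact triLt_lt_ff hlt hib
              · rw [hget_swap_other hip hij, hget_swap_other hpar_p hpar_j]
                exact B1 i hi0 hil hij
        · -- B2 for the swapped list at p
          intro c hcl hcp hp0
          rw [hswl] at hcl
          have hgp_ne_p : (p - 1) / 2 ≠ p := by omega
          have hgp_ne_j : (p - 1) / 2 ≠ j := by omega
          rw [hget_swap_other hgp_ne_p hgp_ne_j]
          by_cases hcj : c = j
          · subst hcj
            rw [hget_swap_snd hjl]
            exact B1 p hp0 hpl (by omega)
          · have hcp' : c ≠ p := by omega
            rw [hget_swap_other hcp' hcj]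
            have hcb : triLt (hget h c) (hget h p) = false := by
              have := B1 c (by omega) hcl (by omega); rwa [hcp] at this
            exact triLt_ff_trans hcb (B1 p hp0 hpl (by omega))
      · simp only [hlt]
        intro i hi0 hil
        by_cases hij : i = j
        · subst hij
          rw [← hp]
          exact Bool.not_eq_true _ ▸ (by simpa using hlt)
        · exact B1 i hi0 hil hij

theorem hget_append {h : List Tri} {x : Tri} {i : Nat} (hi : i < h.length) :
    hget (h ++ [x]) i = hget h i := by
  simp only [hget]
  exact List.getD_append _ _ _ _ hi

theorem hpush_heap {h : List Tri} (HH : HeapProp h) (x : Tri) : HeapProp (hpush h x) := by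
  apply siftUp_heap h.length (h ++ [x]) h.length (le_refl _) (by simp)
  · intro i hi0 hil hine
    have hil' : i < h.length := by simp only [List.length_append, List.length_cons, List.length_nil] at hil; omega
    rw [hget_append hil', hget_append (by omega)]
    exact HH i hi0 hil'
  · intro c hcl hcp hc0
    simp only [List.length_append, List.length_cons, List.length_nil] at hcl
    omega

theorem heapProp_nil : HeapProp [] := by
  intro j h0 hl
  simp at hl

theorem foldl_hpush_heap : ∀ (l acc : List Tri), HeapProp acc → HeapProp (l.foldl hpush acc) := by
  intro l
  induction l with
  | nil => intro acc hacc; exact hacc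
  | cons x r ih =>
    intro acc hacc
    exact ih _ (hpush_heap hacc x)

theorem heapify_heap (l : List Tri) : HeapProp (heapify l) :=
  foldl_hpush_heap l [] heapProp_nil

theorem childSel_facts (h : List Tri) (i : Nat) (hc1 : 2 * i + 1 < h.length) :
    childSel h i < h.length ∧ (childSel h i - 1) / 2 = i ∧ i < childSel h i := by
  unfold childSel
  by_cases hch : 2 * i + 2 < h.length ∧ triLt (hget h (2 * i + 2)) (hget h (2 * i + 1)) = true
  · rw [if_pos hch]
    exact ⟨hch.1, by omega, by omega⟩
  · rw [if_neg hch]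
    exact ⟨hc1, by omega, by omega⟩

theorem childSel_min {h : List Tri} {i : Nat} (hc1 : 2 * i + 1 < h.length) :
    ∀ o, 0 < o → o < h.length → (o - 1) / 2 = i → triLt (hget h o) (hget h (childSel h i)) = false := by
  intro o ho0 ho hoi
  have ho' : o = 2 * i + 1 ∨ o = 2 * i + 2 := by omega
  unfold childSel
  by_cases hch : 2 * i + 2 < h.length ∧ triLt (hget h (2 * i + 2)) (hget h (2 * i + 1)) = true
  · rw [if_pos hch]
    rcases ho' with rfl | rfl
    · exact triLt_asymm hch.2
    · exact triLt_irrefl _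
  · rw [if_neg hch]
    rcases ho' with rfl | rfl
    · exact triLt_irrefl _
    · have : ¬ (triLt (hget h (2 * i + 2)) (hget h (2 * i + 1)) = true) := by
        intro hx; exact hch ⟨by omega, hx⟩
      simpa using this

theorem siftDown_heap : ∀ (f : Nat) (h : List Tri) (i : Nat), h.length ≤ f + i →
    (∀ d, 0 < d → d < h.length → (d - 1) / 2 ≠ i →
      triLt (hget h d) (hget h ((d - 1) / 2)) = false) →
    (∀ d, d < h.length → (d - 1) / 2 = i → 0 < i →
      triLt (hget h d) (hget h ((i - 1) / 2)) = false) →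
    HeapProp (siftDown f h i) := by
  intro f
  induction f with
  | zero =>
    intro h i hfl S1 _
    rw [siftDown]
    intro j hj0 hjl
    exact S1 j hj0 hjl (by omega)
  | succ f ih =>
    intro h i hfl S1 S2
    rw [siftDown]
    by_cases hc1 : 2 * i + 1 < h.length
    · simp only [hc1, if_true]
      obtain ⟨hcl, hci, hic⟩ := childSel_facts h i hc1
      have cmin := childSel_min hc1
      set c := childSel h i with hcdef
      have hil : i < h.length := by omega
      by_cases hlt : triLt (hget h c) (hget h i) = true
      · simp only [hlt, if_true]
        have hswl : (hswap h i c).length = h.length := hswap_length ..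
        apply ih _ c (by omega)
        · intro d hd0 hdl hdc
          rw [hswl] at hdl
          by_cases hdc_eq : d = c
          · subst hdc_eq
            rw [hget_swap_snd hcl, hci, hget_swap_fst (by omega) hil]
            exact triLt_asymm hlt
          · by_cases hpar_i : (d - 1) / 2 = i
            · rw [hget_swap_other (by omega) hdc_eq, hpar_i, hget_swap_fst (by omega) hil]
              exact cmin d (by omega) hdl hpar_i
            · by_cases hd_i : d = i
              · have hi0 : 0 < i := by omega
                subst hd_i
                rw [hget_swap_fst (by omega) hil, hget_swap_other (by omega) (by omega)]
                exact S2 c hcl hci hi0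
              · rw [hget_swap_other hd_i hdc_eq, hget_swap_other hpar_i hdc]
                exact S1 d hd0 hdl hpar_i
        · intro d hdl hd2 hc0
          rw [hswl] at hdl
          rw [hci, hget_swap_fst (by omega) hil, hget_swap_other (by omega) (by omega)]
          have := S1 d (by omega) hdl (by omega)
          rwa [hd2] at this
      · simp only [hlt]
        intro j hj0 hjl
        by_cases hpar : (j - 1) / 2 = i
        · by_cases hjc : j = c
          · subst hjc
            rw [hpar]
            simpa using hlt
          · rw [hpar]
            exact triLt_ff_trans (cmin j (by omega) hjl hpar) (by simpa using hlt)
        · exact S1 j hj0 hjl hpar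
    · simp only [hc1, if_false]
      intro j hj0 hjl
      exact S1 j hj0 hjl (by omega)

theorem heapreplace_heap {h : List Tri} (HH : HeapProp h) (x : Tri) :
    HeapProp (heapreplace h x) := by
  apply siftDown_heap h.length (h.set 0 x) 0 (by simp)
  · intro d hd0 hdl hdp
    rw [hget_set_ne (by omega), hget_set_ne (by omega)]
    exact HH d hd0 (by simpa using hdl)
  · intro d hdl hd2 h00
    omega

-- ---- abstract state: values, budget, cost ----
def vk (e : Tri) : Nat := e.2.1.toNat
def vs (e : Tri) : Nat := e.2.2.toNat
def vv (e : Tri) : Nat := vk e / vs e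

def GE (e : Tri) : Prop :=
  e.1 = -(vv e : Int) ∧ e.2.1 = (vk e : Int) ∧ e.2.2 = (vs e : Int) ∧ 1 ≤ vk e ∧ 1 ≤ vs e

def Good (h : List Tri) : Prop := ∀ e ∈ h, GE e

def spent (h : List Tri) : Nat := (h.map (fun e => vs e - 1)).sum

def cost (h : List Tri) (L : Nat) : Nat := (h.map (fun e => vk e / (L + 1))).sum

def GInv (h : List Tri) : Prop :=
  ∀ e ∈ h, 2 ≤ vs e → ∀ e' ∈ h, vv e' ≤ vk e / (vs e - 1)

def P2 (e : Tri) : Prop := 2 ≤ vv e ∧ vk e ≠ 3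

def mkTri (k s : Nat) : Tri := (-((k / s : Nat) : Int), (k : Int), (s : Int))

theorem mkTri_fields (k s : Nat) : vk (mkTri k s) = k ∧ vs (mkTri k s) = s ∧ vv (mkTri k s) = k / s := by
  simp [mkTri, vk, vs, vv]

theorem mkTri_GE {k s : Nat} (hk : 1 ≤ k) (hs : 1 ≤ s) : GE (mkTri k s) := by
  obtain ⟨h1, h2, h3⟩ := mkTri_fields k s
  exact ⟨by rw [h1, h2] at *; simp [mkTri, vv, vk, vs], by simp [mkTri, vk], by simp [mkTri, vs], by omega, by omega⟩

-- ---- division flips ----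
theorem div_flip_lt {k a b : Nat} (ha : 0 < a) (hb : 0 < b) : k / a < b ↔ k / b < a := by
  rw [Nat.div_lt_iff_lt_mul ha, Nat.div_lt_iff_lt_mul hb, Nat.mul_comm]

theorem div_flip_le {k a b : Nat} (ha : 0 < a) (hb : 0 < b) : b ≤ k / a ↔ a ≤ k / b := by
  rw [Nat.le_div_iff_mul_le ha, Nat.le_div_iff_mul_le hb, Nat.mul_comm]

-- ---- K1: if all values are ≤ L then total cost at L is within spent ----
theorem cost_le_spent {h : List Tri} {L : Nat} (HG : Good h) (hb : ∀ e ∈ h, vv e ≤ L) :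
    cost h L ≤ spent h := by
  apply List.sum_le_sum
  intro e he
  obtain ⟨_, _, _, hk, hs⟩ := HG e he
  have h1 : vk e / vs e < L + 1 := by
    have := hb e he
    simp only [vv] at this
    omega
  have h2 : vk e / (L + 1) < vs e := (div_flip_lt (by omega) (by omega)).mp h1
  omega

-- ---- K2: greedy-likeness forces cost at (max value - 1) to exceed spent ----
theorem spent_lt_cost_pred {h : List Tri} {e0 : Tri} (HG : Good h) (HGL : GInv h)
    (he0 : e0 ∈ h) (hmax : ∀ e ∈ h, vv e ≤ vv e0) (hM : 1 ≤ vv e0) :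
    spent h + 1 ≤ cost h (vv e0 - 1) := by
  set M := vv e0 with hMdef
  have hM1 : M - 1 + 1 = M := by omega
  have point : ∀ e ∈ h, vs e - 1 ≤ vk e / M := by
    intro e he
    rcases Nat.lt_or_ge (vs e) 2 with hs2 | hs2
    · have h0 : vs e - 1 = 0 := by omega
      rw [h0]; exact Nat.zero_le _
    · have hgl := HGL e he hs2 e0 he0
      have : vs e - 1 ≤ vk e / M := (div_flip_le (by omega) (by omega)).mp hgl
      exact this
  have point0 : vs e0 ≤ vk e0 / M := by
    have : M ≤ vk e0 / vs e0 := le_of_eq hMdef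
    obtain ⟨_, _, _, hk, hs⟩ := HG e0 he0
    exact (div_flip_le (by omega) (by omega)).mp this
  obtain ⟨l1, l2, rfl⟩ := List.append_of_mem he0
  have hs1 : ((l1.map (fun e => vs e - 1)).sum ≤ (l1.map (fun e => vk e / M)).sum) := by
    apply List.sum_le_sum; intro e he; exact point e (by simp [he])
  have hs2 : ((l2.map (fun e => vs e - 1)).sum ≤ (l2.map (fun e => vk e / M)).sum) := by
    apply List.sum_le_sum; intro e he; exact point e (by simp [he])
  simp only [spent, cost, List.map_append, List.map_cons, List.sum_append, List.sum_cons, hM1]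
  obtain ⟨_, _, _, hk, hs⟩ := HG e0 (by simp)
  omega

-- ---- antitone cost ----
theorem cost_anti (h : List Tri) {L L' : Nat} (hle : L ≤ L') : cost h L' ≤ cost h L := by
  apply List.sum_le_sum
  intro e _
  exact Nat.div_le_div_left (by omega) (by omega)

-- ---- permutation transfer ----
theorem Good_perm {h h' : List Tri} (hp : h.Perm h') (HG : Good h') : Good h := by
  intro e he; exact HG e (hp.mem_iff.mp he)

theorem GInv_perm {h h' : List Tri} (hp : h.Perm h') (HGL : GInv h') : GInv h := by
  intro e he hs e' he'
  exact HGL e (hp.mem_iff.mp he) hs e' (hp.mem_iff.mp he')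

theorem spent_perm {h h' : List Tri} (hp : h.Perm h') : spent h = spent h' :=
  (hp.map _).sum_eq

theorem cost_perm {h h' : List Tri} (hp : h.Perm h') (L : Nat) : cost h L = cost h' L :=
  (hp.map _).sum_eq

-- ---- the split step: replace the head (a maximal element) by its split ----
theorem step_good {a : Tri} {t : List Tri} (HG : Good (a :: t)) :
    Good (mkTri (vk a) (vs a + 1) :: t) := by
  intro e he
  rcases List.mem_cons.mp he with rfl | he'
  · obtain ⟨_, _, _, hk, hs⟩ := HG a (by simp)
    exact mkTri_GE (by omega) (by omega)
  · exact HG e (by simp [he'])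

theorem step_gl {a : Tri} {t : List Tri} (HG : Good (a :: t)) (HGL : GInv (a :: t))
    (hmax : ∀ e ∈ a :: t, vv e ≤ vv a) :
    GInv (mkTri (vk a) (vs a + 1) :: t) := by
  obtain ⟨hf1, hf2, hf3⟩ := mkTri_fields (vk a) (vs a + 1)
  have hnewle : vv (mkTri (vk a) (vs a + 1)) ≤ vv a := by
    rw [hf3]
    exact Nat.div_le_div_left (by omega) (by
      obtain ⟨_, _, _, _, hs⟩ := HG a (by simp); omega)
  intro e he hs2 e' he'
  rcases List.mem_cons.mp he with rfl | he1
  · -- e is the new split element: its bound is exactly vv a, the old max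
    rw [hf1, hf2]
    have : vk a / (vs a + 1 - 1) = vv a := by simp [vv]
    rw [this]
    rcases List.mem_cons.mp he' with rfl | he2
    · exact hnewle
    · exact hmax e' (by simp [he2])
  · have hb := HGL e (by simp [he1]) hs2
    rcases List.mem_cons.mp he' with rfl | he2
    · exact le_trans hnewle (le_trans (hmax a (by simp)) (hb a (by simp)))
    · exact hb e' (by simp [he2])

theorem step_spent {a : Tri} {t : List Tri} (HG : Good (a :: t)) :
    spent (mkTri (vk a) (vs a + 1) :: t) = spent (a :: t) + 1 := by
  obtain ⟨_, hf2, _⟩ := mkTri_fields (vk a) (vs a + 1)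
  obtain ⟨_, _, _, hk, hs⟩ := HG a (by simp)
  simp only [spent, List.map_cons, List.sum_cons, hf2]
  omega

theorem step_cost {a : Tri} {t : List Tri} (L : Nat) :
    cost (mkTri (vk a) (vs a + 1) :: t) L = cost (a :: t) L := by
  obtain ⟨hf1, _, _⟩ := mkTri_fields (vk a) (vs a + 1)
  simp only [cost, List.map_cons, List.sum_cons, hf1]

-- value of a split element stays ≥ 2 when it was ≥ 3 and k ≠ 3
theorem split_keeps_two {k s : Nat} (hs : 1 ≤ s) (h3 : 3 ≤ k / s) (hne3 : k ≠ 3) :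
    2 ≤ k / (s + 1) := by
  have h1 : 3 * s ≤ k := (Nat.le_div_iff_mul_le (by omega)).mp h3
  by_contra hcon
  have h2 : k / (s + 1) < 2 := by omega
  have h3' : k < 2 * (s + 1) := by
    have := (Nat.div_lt_iff_lt_mul (k := s + 1) (x := k) (y := 2) (by omega)).mp h2
    omega
  omega

theorem three_div_ne_two {s : Nat} (hs : 1 ≤ s) : (3 : Nat) / s ≠ 2 := by
  rcases Nat.lt_or_ge s 2 with h | h
  · have : s = 1 := by omega
    subst this; decide
  · have : 3 / s ≤ 3 / 2 := Nat.div_le_div_left h (by omega)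
    omega

theorem vv_two_P2 {e : Tri} (hge : GE e) (h2 : vv e = 2) : P2 e := by
  refine ⟨by omega, ?_⟩
  intro hk3
  obtain ⟨_, _, _, hk, hs⟩ := hge
  have : vk e / vs e = 2 := h2
  rw [hk3] at this
  exact three_div_ne_two hs this

-- ---- plumbing: the root of a good heap is a maximal-value element ----
theorem hget0_cons (a : Tri) (t : List Tri) : hget (a :: t) 0 = a := rfl

theorem root_max {h : List Tri} (HH : HeapProp h) (HG : Good h) :
    ∀ e ∈ h, vv e ≤ vv (hget h 0) := by
  intro e he
  have hne : h ≠ [] := List.ne_nil_of_mem he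
  have hr : hget h 0 ∈ h := by
    cases h with
    | nil => exact absurd rfl hne
    | cons a t => simp [hget0_cons]
  have hff := heap_root_min_mem HH he
  obtain ⟨h1e, _, _, _, _⟩ := HG e he
  obtain ⟨h1r, _, _, _, _⟩ := HG _ hr
  simp only [triLt, decide_eq_false_iff_not] at hff
  omega

theorem port_triple_eq {a : Tri} (hge : GE a) :
    (-(PySem.Int.floordiv a.2.1 (a.2.2 + 1)), a.2.1, a.2.2 + 1) = mkTri (vk a) (vs a + 1) := by
  obtain ⟨_, h2, h3, _, _⟩ := hge
  rw [h2, h3]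
  have hcast : ((vs a : Int) + 1) = ((vs a + 1 : Nat) : Int) := by push_cast; ring
  rw [hcast, PySem.Int.floordiv_natCast]
  rfl

theorem root_cond_iff {a : Tri} (hge : GE a) : a.1 = -2 ↔ vv a = 2 := by
  obtain ⟨h1, _, _, _, _⟩ := hge
  omega

theorem step_pack {a : Tri} {tl : List Tri} (HH : HeapProp (a :: tl)) (HG : Good (a :: tl))
    (HGL : GInv (a :: tl)) (hmax : ∀ e ∈ a :: tl, vv e ≤ vv a) :
    heapreplace (a :: tl) (mkTri (vk a) (vs a + 1)) ≠ [] ∧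
    HeapProp (heapreplace (a :: tl) (mkTri (vk a) (vs a + 1))) ∧
    Good (heapreplace (a :: tl) (mkTri (vk a) (vs a + 1))) ∧
    GInv (heapreplace (a :: tl) (mkTri (vk a) (vs a + 1))) ∧
    spent (heapreplace (a :: tl) (mkTri (vk a) (vs a + 1))) = spent (a :: tl) + 1 ∧
    (∀ L, cost (heapreplace (a :: tl) (mkTri (vk a) (vs a + 1))) L = cost (a :: tl) L) ∧
    (heapreplace (a :: tl) (mkTri (vk a) (vs a + 1))).Perm (mkTri (vk a) (vs a + 1) :: tl) := by
  have hp : (heapreplace (a :: tl) (mkTri (vk a) (vs a + 1))).Perm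
      (mkTri (vk a) (vs a + 1) :: tl) := by
    have := heapreplace_perm (h := a :: tl) (by simp) (mkTri (vk a) (vs a + 1))
    simpa using this
  refine ⟨?_, heapreplace_heap HH _, Good_perm hp (step_good HG),
    GInv_perm hp (step_gl HG HGL hmax), (spent_perm hp).trans (step_spent HG),
    fun L => (cost_perm hp L).trans (step_cost L), hp⟩
  intro hnil
  have := hp.length_eq
  rw [hnil] at this
  simp at this

theorem loopA_char : ∀ (fuel : Nat) (h : List Tri), h ≠ [] → HeapProp h → Good h → GInv h →
    spent h + fuel < cost h 1 →
    ∃ M : Nat, 2 ≤ M ∧ loopA fuel h = (M : Int) ∧ cost h M ≤ spent h + fuel ∧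
      spent h + fuel < cost h (M - 1) := by
  intro fuel
  induction fuel with
  | zero =>
    intro h hne HH HG HGL hreg
    have hr : hget h 0 ∈ h := by
      cases h with
      | nil => exact absurd rfl hne
      | cons a t => simp [hget0_cons]
    have hmax := root_max HH HG
    have h2 : 2 ≤ vv (hget h 0) := by
      by_contra hcon
      have : cost h 1 ≤ spent h :=
        cost_le_spent HG (fun e he => le_trans (hmax e he) (by omega))
      omega
    refine ⟨vv (hget h 0), h2, ?_, ?_, ?_⟩
    · obtain ⟨h1, _, _, _, _⟩ := HG _ hr
      simp only [loopA, h1]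
      simp
    · have := cost_le_spent HG hmax
      omega
    · have := spent_lt_cost_pred HG HGL hr hmax (by omega)
      omega
  | succ fuel ih =>
    intro h hne HH HG HGL hreg
    obtain ⟨a, tl, rfl⟩ : ∃ a tl, h = a :: tl := by
      cases h with
      | nil => exact absurd rfl hne
      | cons a tl => exact ⟨a, tl, rfl⟩
    have hga := HG a (by simp)
    have hmax : ∀ e ∈ a :: tl, vv e ≤ vv a := by
      have := root_max HH HG
      simpa [hget0_cons] using this
    rw [loopA]
    simp only [hget0_cons]
    by_cases h2 : vv a = 2
    · rw [if_pos ((root_cond_iff hga).mpr h2)]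
      refine ⟨2, le_refl 2, by norm_num, ?_, ?_⟩
      · have : cost (a :: tl) 2 ≤ spent (a :: tl) :=
          cost_le_spent HG (fun e he => le_trans (hmax e he) (by omega))
        omega
      · simpa using hreg
    · rw [if_neg (fun hc => h2 ((root_cond_iff hga).mp hc))]
      rw [port_triple_eq hga]
      obtain ⟨hne', HH', HG', HGL', hsp', hc', hp'⟩ := step_pack HH HG HGL hmax
      have hreg' : spent (heapreplace (a :: tl) (mkTri (vk a) (vs a + 1))) + fuel <
          cost (heapreplace (a :: tl) (mkTri (vk a) (vs a + 1))) 1 := by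
        rw [hsp', hc']
        omega
      obtain ⟨M, hM2, hMv, hMc, hMl⟩ := ih _ hne' HH' HG' HGL' hreg'
      rw [hsp', hc'] at hMc hMl
      exact ⟨M, hM2, hMv, by omega, by omega⟩

theorem loopA_p2 : ∀ (fuel : Nat) (h : List Tri), h ≠ [] → HeapProp h → Good h → GInv h →
    cost h 1 ≤ spent h + fuel → (∃ e ∈ h, P2 e) → loopA fuel h = 2 := by
  intro fuel
  induction fuel with
  | zero =>
    intro h hne HH HG HGL hreg ⟨w, hw, hwp⟩
    exfalso
    have hr : hget h 0 ∈ h := by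
      cases h with
      | nil => exact absurd rfl hne
      | cons a t => simp [hget0_cons]
    have hmax := root_max HH HG
    have h2 : 2 ≤ vv (hget h 0) := le_trans hwp.1 (hmax w hw)
    have hk2 := spent_lt_cost_pred HG HGL hr hmax (by omega)
    have hanti : cost h (vv (hget h 0) - 1) ≤ cost h 1 := cost_anti h (by omega)
    omega
  | succ fuel ih =>
    intro h hne HH HG HGL hreg hex
    obtain ⟨a, tl, rfl⟩ : ∃ a tl, h = a :: tl := by
      cases h with
      | nil => exact absurd rfl hne
      | cons a tl => exact ⟨a, tl, rfl⟩
    have hga := HG a (by simp)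
    have hmax : ∀ e ∈ a :: tl, vv e ≤ vv a := by
      have := root_max HH HG
      simpa [hget0_cons] using this
    rw [loopA]
    simp only [hget0_cons]
    by_cases h2 : vv a = 2
    · rw [if_pos ((root_cond_iff hga).mpr h2)]
    · rw [if_neg (fun hc => h2 ((root_cond_iff hga).mp hc))]
      rw [port_triple_eq hga]
      obtain ⟨w, hw, hwp⟩ := hex
      have ha3 : 3 ≤ vv a := by
        have := le_trans hwp.1 (hmax w hw)
        omega
      obtain ⟨hne', HH', HG', HGL', hsp', hc', hp'⟩ := step_pack HH HG HGL hmax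
      apply ih _ hne' HH' HG' HGL'
      · rw [hsp', hc']
        omega
      · -- a surviving P2 witness
        rcases List.mem_cons.mp hw with rfl | hw'
        · refine ⟨mkTri (vk w) (vs w + 1), hp'.mem_iff.mpr (by simp), ?_, ?_⟩
          · obtain ⟨_, _, hf3⟩ := mkTri_fields (vk w) (vs w + 1)
            rw [hf3]
            obtain ⟨_, _, _, hk, hs⟩ := hga
            exact split_keeps_two hs ha3 hwp.2
          · obtain ⟨hf1, hf2, _⟩ := mkTri_fields (vk w) (vs w + 1)
            rw [hf1]
            exact hwp.2
        · exact ⟨w, hp'.mem_iff.mpr (by simp [hw']), hwp⟩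

theorem loopA_nop2 : ∀ (fuel : Nat) (h : List Tri), h ≠ [] → HeapProp h → Good h → GInv h →
    cost h 1 ≤ spent h + fuel → spent h + fuel < cost h 0 → (∀ e ∈ h, ¬ P2 e) →
    loopA fuel h = 1 := by
  intro fuel
  induction fuel with
  | zero =>
    intro h hne HH HG HGL hreg hlow hno
    have hr : hget h 0 ∈ h := by
      cases h with
      | nil => exact absurd rfl hne
      | cons a t => simp [hget0_cons]
    have hmax := root_max HH HG
    have hlt2 : vv (hget h 0) < 2 := by
      by_contra hcon
      have hk2 := spent_lt_cost_pred HG HGL hr hmax (by omega)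
      have hanti : cost h (vv (hget h 0) - 1) ≤ cost h 1 := cost_anti h (by omega)
      have hanti1 : cost h 1 ≤ spent h := by omega
      omega
    have hne0 : vv (hget h 0) ≠ 0 := by
      intro h0
      have hall : ∀ e ∈ h, vs e - 1 ≥ vk e / 1 := by
        intro e he
        obtain ⟨_, _, _, hk, hs⟩ := HG e he
        have hvve := hmax e he
        rw [h0] at hvve
        have hvv : vk e / vs e = 0 := by
          have hvv2 : vv e = 0 := by omega
          exact hvv2
        have : vk e < vs e := by
          have h5 := (Nat.div_lt_iff_lt_mul (k := vs e) (x := vk e) (y := 1) (by omega)).mp (by omega)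
          omega
        simp only [Nat.div_one]
        omega
      have : cost h 0 ≤ spent h := by
        apply List.sum_le_sum
        intro e he
        simpa using hall e he
      omega
    have h1 : vv (hget h 0) = 1 := by omega
    obtain ⟨hh1, _, _, _, _⟩ := HG _ hr
    simp only [loopA, hh1, h1]
    simp
  | succ fuel ih =>
    intro h hne HH HG HGL hreg hlow hno
    obtain ⟨a, tl, rfl⟩ : ∃ a tl, h = a :: tl := by
      cases h with
      | nil => exact absurd rfl hne
      | cons a tl => exact ⟨a, tl, rfl⟩
    have hga := HG a (by simp)
    have hmax : ∀ e ∈ a :: tl, vv e ≤ vv a := by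
      have := root_max HH HG
      simpa [hget0_cons] using this
    rw [loopA]
    simp only [hget0_cons]
    by_cases h2 : vv a = 2
    · exact absurd (vv_two_P2 hga h2) (hno a (by simp))
    · rw [if_neg (fun hc => h2 ((root_cond_iff hga).mp hc))]
      rw [port_triple_eq hga]
      obtain ⟨hne', HH', HG', HGL', hsp', hc', hp'⟩ := step_pack HH HG HGL hmax
      apply ih _ hne' HH' HG' HGL'
      · rw [hsp', hc']; omega
      · rw [hsp', hc']; omega
      · intro e he
        rcases List.mem_cons.mp (hp'.mem_iff.mp he) with rfl | he'
        · obtain ⟨hf1, hf2, hf3⟩ := mkTri_fields (vk a) (vs a + 1)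
          intro ⟨hpa, hpb⟩
          rw [hf3] at hpa
          rw [hf1] at hpb
          have hnpa := hno a (by simp)
          obtain ⟨_, _, _, hk, hs⟩ := hga
          have hva : vv a ≤ 1 ∨ vk a = 3 := by
            by_contra hc
            push_neg at hc
            exact hnpa ⟨by omega, hc.2⟩
          rcases hva with hva | hva
          · have : vk a / (vs a + 1) ≤ vk a / vs a := Nat.div_le_div_left (by omega) (by omega)
            have : vk a / (vs a + 1) ≤ vv a := le_trans this (le_refl _)
            omega
          · exact hpb hva
        · exact hno e (by simp [he'])

-- ---- B-side helpers equal A-side helpers (they are the same Python lines) ----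
theorem cntB_eq : ∀ (l : List Char) (i : Nat), cntB i l = cntAux i l := by
  intro l
  induction l with
  | nil => intro i; rfl
  | cons c r ih => intro i; simp [cntB, cntAux, ih]

theorem runLensBF_eq : ∀ (f : Nat) (l : List Char), runLensBF f l = runLensF f l := by
  intro f
  induction f with
  | zero => intro l; cases l <;> rfl
  | succ f ih => intro l; cases l <;> simp [runLensBF, runLensF, ih]

theorem runLensB_eq (l : List Char) : runLensB l = runLens l := runLensBF_eq _ _

-- ---- facts about the run lengths ----
theorem runLensF_pos : ∀ (f : Nat) (l : List Char) (k : Int), k ∈ runLensF f l → 1 ≤ k := by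
  intro f
  induction f with
  | zero => intro l k hk; cases l <;> simp [runLensF] at hk
  | succ f ih =>
    intro l k hk
    cases l with
    | nil => simp [runLensF] at hk
    | cons c r =>
      simp only [runLensF, List.mem_cons] at hk
      rcases hk with rfl | hk
      · have : (0 : Int) ≤ ((r.takeWhile (· == c)).length : Int) := by positivity
        omega
      · exact ih _ _ hk

theorem runLens_pos (l : List Char) : ∀ k ∈ runLens l, 1 ≤ k :=
  fun k hk => runLensF_pos _ _ k hk

theorem runLensF_sum : ∀ (f : Nat) (l : List Char), l.length ≤ f →
    (runLensF f l).sum = (l.length : Int) := by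
  intro f
  induction f with
  | zero =>
    intro l hl
    have : l = [] := List.eq_nil_of_length_eq_zero (by omega)
    subst this; rfl
  | succ f ih =>
    intro l hl
    cases l with
    | nil => rfl
    | cons c r =>
      have hsplit : (r.takeWhile (· == c)).length + (r.dropWhile (· == c)).length = r.length := by
        have h := congrArg List.length (List.takeWhile_append_dropWhile (p := (· == c)) (l := r))
        rw [List.length_append] at h
        exact h
      simp only [runLensF, List.sum_cons]
      rw [ih _ (by simp only [List.length_cons] at hl; omega)]
      simp only [List.length_cons]
      push_cast
      omega

theorem runLens_sum (l : List Char) : (runLens l).sum = (l.length : Int) :=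
  runLensF_sum _ _ (le_refl _)

theorem runLens_ne_nil {l : List Char} (hl : l ≠ []) : runLens l ≠ [] := by
  cases l with
  | nil => exact absurd rfl hl
  | cons c r => simp [runLens, runLensF]

-- ---- the initial heap content ----
def natCost (runs : List Int) (L : Nat) : Nat := (runs.map (fun k => k.toNat / (L + 1))).sum

theorem init_good {runs : List Int} (hpos : ∀ k ∈ runs, 1 ≤ k) :
    Good (runs.map fun k => (-k, k, 1)) := by
  intro e he
  obtain ⟨k, hk, rfl⟩ := List.mem_map.mp he
  have h1 := hpos k hk
  refine ⟨?_, ?_, ?_, ?_, ?_⟩ <;> simp [vk, vs, vv] <;> omega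

theorem init_gi (runs : List Int) : GInv (runs.map fun k => (-k, k, 1)) := by
  intro e he h2 e' he'
  obtain ⟨k, hk, rfl⟩ := List.mem_map.mp he
  simp [vs] at h2

theorem init_spent (runs : List Int) : spent (runs.map fun k => (-k, k, 1)) = 0 := by
  apply List.sum_eq_zero
  intro x hx
  obtain ⟨e, he, rfl⟩ := List.mem_map.mp hx
  obtain ⟨k, hk, rfl⟩ := List.mem_map.mp he
  simp [vs]

theorem init_cost (runs : List Int) (L : Nat) :
    cost (runs.map fun k => (-k, k, 1)) L = natCost runs L := by
  simp only [cost, natCost, List.map_map]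
  rfl

theorem natCost_anti (runs : List Int) {L L' : Nat} (hle : L ≤ L') :
    natCost runs L' ≤ natCost runs L := by
  rw [← init_cost, ← init_cost]
  exact cost_anti _ hle

-- B's feasibility sum is the Nat cost, cast to Int
theorem bsum_eq_natCost (runs : List Int) (hpos : ∀ k ∈ runs, 1 ≤ k) (L : Int) (hL : 0 ≤ L) :
    (runs.map (fun k => PySem.Int.floordiv k (L + 1))).sum = ((natCost runs L.toNat : Nat) : Int) := by
  induction runs with
  | nil => simp [natCost]
  | cons k r ih =>
    have hk := hpos k (by simp)
    have hcast1 : k = ((k.toNat : Nat) : Int) := by omega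
    have hcast2 : (L + 1) = ((L.toNat + 1 : Nat) : Int) := by omega
    have hhead : PySem.Int.floordiv k (L + 1) = ((k.toNat / (L.toNat + 1) : Nat) : Int) := by
      conv_lhs => rw [hcast1, hcast2]
      rw [PySem.Int.floordiv_natCast]
    simp only [List.map_cons, List.sum_cons]
    rw [hhead, ih (fun x hx => hpos x (by simp [hx]))]
    simp only [natCost, List.map_cons, List.sum_cons]
    push_cast
    omega

-- ---- binary search characterization ----
theorem bisF_eq (runs : List Int) (numOps : Int) :
    ∀ (f : Nat) (lo hi M : Int), (hi - lo).toNat ≤ f → lo ≤ M → M ≤ hi →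
    (∀ L : Int, lo ≤ L → L < M →
      ¬ ((runs.map (fun k => PySem.Int.floordiv k (L + 1))).sum ≤ numOps)) →
    (∀ L : Int, M ≤ L → L < hi →
      ((runs.map (fun k => PySem.Int.floordiv k (L + 1))).sum ≤ numOps)) →
    bisF runs numOps f lo hi = M := by
  intro f
  induction f with
  | zero =>
    intro lo hi M hf h1 h2 _ _
    simp only [bisF]
    omega
  | succ f ih =>
    intro lo hi M hf h1 h2 Hlow Hhigh
    rw [bisF]
    by_cases hlt : lo < hi
    · rw [if_pos hlt]
      have hmb := PySem.Int.floordiv_two_mid_bounds (le_of_lt hlt)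
      have hmlt : PySem.Int.floordiv (lo + hi) 2 < hi := by
        have := PySem.Int.floordiv_lt_iff_lt_mul (a := lo + hi) (b := 2) (q := hi) (by omega)
        omega
      dsimp only
      by_cases hP : (runs.map (fun k => PySem.Int.floordiv k (PySem.Int.floordiv (lo + hi) 2 + 1))).sum ≤ numOps
      · rw [if_pos hP]
        have hMm : M ≤ PySem.Int.floordiv (lo + hi) 2 := by
          by_contra hcon
          exact Hlow _ hmb.1 (by omega) hP
        exact ih _ _ _ (by omega) h1 hMm Hlow (fun L hL1 hL2 => Hhigh L hL1 (by omega))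
      · rw [if_neg hP]
        have hMm : PySem.Int.floordiv (lo + hi) 2 < M := by
          by_contra hcon
          exact hP (Hhigh _ (by omega) hmlt)
        exact ih _ _ _ (by omega) (by omega) h2
          (fun L hL1 hL2 => Hlow L (by omega) hL2) Hhigh
    · rw [if_neg hlt]
      omega

-- ---- bridges between D_'s helpers and the ports' helpers ----
theorem xor_bit (a b : Nat) : (a ^^^ b) &&& 1 = (a + b) % 2 := by
  have h := Nat.and_xor_distrib_right (a := a) (b := b) (c := 1)
  rw [h, Nat.and_one_is_mod, Nat.and_one_is_mod]
  rcases Nat.mod_two_eq_zero_or_one a with h1 | h1 <;>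
    rcases Nat.mod_two_eq_zero_or_one b with h2 | h2 <;>
    rw [h1, h2] <;> simp <;> omega

theorem dcnt_filter : ∀ (l : List Char) (i : Nat),
    ((l.zipIdx i).filter (fun p => (p.1.toNat + p.2) % 2 = 1)).length = cntAux i l := by
  intro l
  induction l with
  | nil => intro i; rfl
  | cons c r ih =>
    intro i
    rw [List.zipIdx_cons]
    simp only [List.filter_cons]
    by_cases hp : (c.toNat + i) % 2 = 1
    · rw [if_pos (by simpa using hp)]
      simp only [List.length_cons, cntAux, xor_bit, hp, ih]
      omega
    · rw [if_neg (by simpa using hp)]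
      simp only [cntAux, xor_bit, ih]
      omega

theorem dCnt_eq (s : String) : dCnt s = ((cntAux 0 s.toList : Nat) : Int) := by
  simp [dCnt, List.countP_eq_length_filter, dcnt_filter]

theorem chain_const (c : Char) : ∀ (t : List Char), (∀ x ∈ t, x = c) →
    (c :: t).IsChain (fun x y => x == y) := by
  intro t
  induction t with
  | nil => intro _; exact List.IsChain.singleton c
  | cons d t' ih =>
    intro h
    have hd : d = c := h d (by simp)
    subst hd
    rw [List.isChain_cons]
    exact ⟨by simp, ih (fun x hx => h x (by simp [hx]))⟩

theorem splitBy_run (c : Char) (r : List Char) :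
    (c :: r).splitBy (· == ·) =
      (c :: r.takeWhile (· == c)) :: (r.dropWhile (· == c)).splitBy (· == ·) := by
  have hsplit : c :: r = (c :: r.takeWhile (· == c)) ++ r.dropWhile (· == c) := by
    rw [List.cons_append, List.takeWhile_append_dropWhile]
  conv_lhs => rw [hsplit]
  rw [List.splitBy_append, List.splitBy_of_isChain (by simp)
    (chain_const c _ (fun x hx => by simpa using List.mem_takeWhile_imp hx))]
  · simp
  · intro x hx y hy
    have hxc : x = c := by
      have hxm := List.mem_of_mem_getLast? hx
      rcases List.mem_cons.mp hxm with rfl | hxm'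
      · rfl
      · simpa using List.mem_takeWhile_imp hxm'
    have ho : (r.dropWhile (· == c)).head? = some y := hy
    have h2 : ¬ (y = c) := by
      have h3 := List.head?_dropWhile_not (· == c) r
      rw [ho] at h3
      simpa using h3
    subst hxc
    simp only [beq_eq_false_iff_ne, ne_eq]
    exact fun h => h2 h.symm

theorem dRuns_eqF : ∀ (f : Nat) (l : List Char), l.length ≤ f →
    dRuns l = (runLensF f l).map Int.toNat := by
  intro f
  induction f with
  | zero =>
    intro l hl
    have : l = [] := List.eq_nil_of_length_eq_zero (by omega)
    subst this; rfl
  | succ f ih =>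
    intro l hl
    cases l with
    | nil => rfl
    | cons c r =>
      have hlen : (r.dropWhile (· == c)).length ≤ f := by
        have h1 := List.length_dropWhile_le (· == c) r
        simp only [List.length_cons] at hl
        omega
      show ((c :: r).splitBy (· == ·)).map List.length = _
      rw [splitBy_run]
      have hrec := ih _ hlen
      show ((c :: r.takeWhile (· == c)).length) ::
          ((r.dropWhile (· == c)).splitBy (· == ·)).map List.length = _
      rw [show ((r.dropWhile (· == c)).splitBy (· == ·)).map List.length =
          dRuns (r.dropWhile (· == c)) from rfl, hrec]
      simp only [runLensF, List.map_cons, List.length_cons]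
      congr 1
      omega

theorem dRuns_eq (l : List Char) : dRuns l = (runLens l).map Int.toNat :=
  dRuns_eqF l.length l (le_refl _)

-- ---- arithmetic facts about natCost on {1,3} runs ----
theorem natCost_cons (k : Int) (r : List Int) (L : Nat) :
    natCost (k :: r) L = k.toNat / (L + 1) + natCost r L := by
  simp [natCost]

theorem natCost_zero_sum : ∀ (rs : List Int), (∀ k ∈ rs, 1 ≤ k) →
    ((natCost rs 0 : Nat) : Int) = rs.sum := by
  intro rs
  induction rs with
  | nil => intro _; simp [natCost]
  | cons k r ih =>
    intro hpos
    have hk := hpos k (by simp)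
    have hr := ih (fun x hx => hpos x (by simp [hx]))
    rw [natCost_cons]
    have h1 : k.toNat / (0 + 1) = k.toNat := by simp
    rw [h1, List.sum_cons]
    push_cast
    omega

theorem natCost_big_zero {rs : List Int} {m : Int} (hpos : ∀ k ∈ rs, 1 ≤ k)
    (hmax : ∀ k ∈ rs, k ≤ m) : natCost rs m.toNat = 0 := by
  unfold natCost
  apply List.sum_eq_zero
  intro x hx
  obtain ⟨k, hk, rfl⟩ := List.mem_map.mp hx
  have h1 := hpos k hk
  have h2 := hmax k hk
  exact Nat.div_eq_of_lt (by omega)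

theorem natCost13_count : ∀ (rs : List Int), (∀ k ∈ rs, k = 1 ∨ k = 3) → ∀ L : Nat,
    (L = 1 ∨ L = 2) → natCost rs L = rs.count 3 := by
  intro rs
  induction rs with
  | nil => intro _ L _; simp [natCost]
  | cons k r ih =>
    intro h13 L hL
    have hk := h13 k (by simp)
    have hrec := ih (fun x hx => h13 x (by simp [hx])) L hL
    rw [natCost_cons, hrec, List.count_cons]
    rcases hk with rfl | rfl <;> rcases hL with rfl | rfl <;> simp <;> omega

theorem count3_toNat : ∀ (rs : List Int), (∀ k ∈ rs, 1 ≤ k) →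
    (rs.map Int.toNat).count 3 = rs.count 3 := by
  intro rs
  induction rs with
  | nil => intro _; rfl
  | cons k r ih =>
    intro hpos
    have hk := hpos k (by simp)
    simp only [List.map_cons, List.count_cons, ih (fun x hx => hpos x (by simp [hx]))]
    congr 1
    by_cases h3 : k = 3
    · subst h3; simp
    · have h4 : k.toNat ≠ 3 := by omega
      simp [h3, h4]

-- ---- shapes of the two ports ----
theorem solve_eq (s : String) (numOps : Int) :
    solve s numOps =
      (if min ((cntAux 0 s.toList : Nat) : Int) (PySem.Str.len s - ((cntAux 0 s.toList : Nat) : Int)) ≤ numOps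
       then 1
       else loopA numOps.toNat (heapify ((runLens s.toList).map (fun k => (-k, k, 1))))) := rfl

theorem solve_alt_eq (s : String) (numOps : Int) :
    solve_alt s numOps =
      (if min ((cntAux 0 s.toList : Nat) : Int) (PySem.Str.len s - ((cntAux 0 s.toList : Nat) : Int)) ≤ numOps
       then 1
       else
         (if (PySem.List.max? (runLens s.toList) (fun x => x)).getD 0 ≤ 2
          then (PySem.List.max? (runLens s.toList) (fun x => x)).getD 0
          else bisB (runLens s.toList) numOps 2
              ((PySem.List.max? (runLens s.toList) (fun x => x)).getD 0))) := by
  unfold solve_alt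
  simp only [cntB_eq, runLensB_eq]
  cases PySem.List.max? (runLens s.toList) fun x => x <;> rfl

-- ---- A-side results, phrased over the character list ----
theorem A_max (l : List Char) (hl : l ≠ []) (m : Int) (hmem : m ∈ runLens l)
    (hub : ∀ k ∈ runLens l, k ≤ m) :
    loopA 0 (heapify ((runLens l).map (fun k => (-k, k, 1)))) = m := by
  have hpos := runLens_pos l
  have hperm := heapify_perm ((runLens l).map fun k => (-k, k, 1))
  have HH := heapify_heap ((runLens l).map fun k => (-k, k, 1))
  have HG : Good (heapify ((runLens l).map fun k => (-k, k, 1))) :=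
    Good_perm hperm (init_good hpos)
  have hne0 : heapify ((runLens l).map fun k => (-k, k, 1)) ≠ [] := by
    intro h0
    have hlen := hperm.length_eq
    rw [h0] at hlen
    simp only [List.length_nil, List.length_map] at hlen
    exact runLens_ne_nil hl (List.eq_nil_of_length_eq_zero hlen.symm)
  have hrmem : hget (heapify ((runLens l).map fun k => (-k, k, 1))) 0 ∈
      heapify ((runLens l).map fun k => (-k, k, 1)) := by
    cases hc : heapify ((runLens l).map fun k => (-k, k, 1)) with
    | nil => exact absurd hc hne0
    | cons a t => simp [hget0_cons]
  obtain ⟨k0, hk0, hroot⟩ := List.mem_map.mp (hperm.mem_iff.mp hrmem)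
  have hk0pos := hpos k0 hk0
  have hub0 := hub k0 hk0
  have hmel : (-m, m, (1 : Int)) ∈ heapify ((runLens l).map fun k => (-k, k, 1)) :=
    hperm.mem_iff.mpr (List.mem_map_of_mem hmem)
  have hvvle := root_max HH HG _ hmel
  rw [← hroot] at hvvle
  have hmpos := hpos m hmem
  have hvv1 : vv (-m, m, (1 : Int)) = m.toNat := by simp [vv, vk, vs]
  have hvv2 : vv (-k0, k0, (1 : Int)) = k0.toNat := by simp [vv, vk, vs]
  rw [hvv1, hvv2] at hvvle
  have hk0m : k0 = m := by omega
  show -(hget (heapify ((runLens l).map fun k => (-k, k, 1))) 0).1 = m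
  rw [← hroot, hk0m]
  simp

theorem A_char (l : List Char) (fuel : Nat) (hl : l ≠ [])
    (hreg : fuel < natCost (runLens l) 1) :
    ∃ M : Nat, 2 ≤ M ∧
      loopA fuel (heapify ((runLens l).map (fun k => (-k, k, 1)))) = (M : Int) ∧
      natCost (runLens l) M ≤ fuel ∧ fuel < natCost (runLens l) (M - 1) := by
  have hpos := runLens_pos l
  have hperm := heapify_perm ((runLens l).map fun k => (-k, k, 1))
  have HH := heapify_heap ((runLens l).map fun k => (-k, k, 1))
  have HG : Good _ := Good_perm hperm (init_good hpos)
  have HGI : GInv _ := GInv_perm hperm (init_gi (runLens l))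
  have hsp : spent (heapify ((runLens l).map fun k => (-k, k, 1))) = 0 :=
    (spent_perm hperm).trans (init_spent (runLens l))
  have hco : ∀ L, cost (heapify ((runLens l).map fun k => (-k, k, 1))) L = natCost (runLens l) L :=
    fun L => (cost_perm hperm L).trans (init_cost (runLens l) L)
  have hne0 : heapify ((runLens l).map fun k => (-k, k, 1)) ≠ [] := by
    intro h0
    have hlen := hperm.length_eq
    rw [h0] at hlen
    simp only [List.length_nil, List.length_map] at hlen
    exact runLens_ne_nil hl (List.eq_nil_of_length_eq_zero hlen.symm)
  obtain ⟨M, h2, hv, hc, hl2⟩ :=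
    loopA_char fuel _ hne0 HH HG HGI (by rw [hsp, hco]; omega)
  rw [hsp, hco] at hc
  rw [hsp, hco] at hl2
  exact ⟨M, h2, hv, by omega, by omega⟩

theorem A_two (l : List Char) (fuel : Nat) (hl : l ≠ [])
    (hreg : natCost (runLens l) 1 ≤ fuel)
    (hex : ∃ k ∈ runLens l, k ≠ 1 ∧ k ≠ 3) :
    loopA fuel (heapify ((runLens l).map (fun k => (-k, k, 1)))) = 2 := by
  have hpos := runLens_pos l
  have hperm := heapify_perm ((runLens l).map fun k => (-k, k, 1))
  have HH := heapify_heap ((runLens l).map fun k => (-k, k, 1))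
  have HG : Good _ := Good_perm hperm (init_good hpos)
  have HGI : GInv _ := GInv_perm hperm (init_gi (runLens l))
  have hsp : spent (heapify ((runLens l).map fun k => (-k, k, 1))) = 0 :=
    (spent_perm hperm).trans (init_spent (runLens l))
  have hco : ∀ L, cost (heapify ((runLens l).map fun k => (-k, k, 1))) L = natCost (runLens l) L :=
    fun L => (cost_perm hperm L).trans (init_cost (runLens l) L)
  have hne0 : heapify ((runLens l).map fun k => (-k, k, 1)) ≠ [] := by
    intro h0
    have hlen := hperm.length_eq
    rw [h0] at hlen
    simp only [List.length_nil, List.length_map] at hlen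
    exact runLens_ne_nil hl (List.eq_nil_of_length_eq_zero hlen.symm)
  obtain ⟨k, hk, hk1, hk3⟩ := hex
  have hkpos := hpos k hk
  apply loopA_p2 fuel _ hne0 HH HG HGI (by rw [hsp, hco]; omega)
  refine ⟨(-k, k, 1), hperm.mem_iff.mpr (List.mem_map_of_mem hk), ?_, ?_⟩
  · show 2 ≤ vv (-k, k, 1)
    simp only [vv, vk, vs]
    simp
    omega
  · show vk (-k, k, 1) ≠ 3
    simp only [vk]
    simp
    omega

theorem A_one (l : List Char) (fuel : Nat) (hl : l ≠ [])
    (hreg : natCost (runLens l) 1 ≤ fuel) (hlow : fuel < natCost (runLens l) 0)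
    (hall : ∀ k ∈ runLens l, k = 1 ∨ k = 3) :
    loopA fuel (heapify ((runLens l).map (fun k => (-k, k, 1)))) = 1 := by
  have hpos := runLens_pos l
  have hperm := heapify_perm ((runLens l).map fun k => (-k, k, 1))
  have HH := heapify_heap ((runLens l).map fun k => (-k, k, 1))
  have HG : Good _ := Good_perm hperm (init_good hpos)
  have HGI : GInv _ := GInv_perm hperm (init_gi (runLens l))
  have hsp : spent (heapify ((runLens l).map fun k => (-k, k, 1))) = 0 :=
    (spent_perm hperm).trans (init_spent (runLens l))
  have hco : ∀ L, cost (heapify ((runLens l).map fun k => (-k, k, 1))) L = natCost (runLens l) L :=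
    fun L => (cost_perm hperm L).trans (init_cost (runLens l) L)
  have hne0 : heapify ((runLens l).map fun k => (-k, k, 1)) ≠ [] := by
    intro h0
    have hlen := hperm.length_eq
    rw [h0] at hlen
    simp only [List.length_nil, List.length_map] at hlen
    exact runLens_ne_nil hl (List.eq_nil_of_length_eq_zero hlen.symm)
  apply loopA_nop2 fuel _ hne0 HH HG HGI (by rw [hsp, hco]; omega) (by rw [hsp, hco]; omega)
  intro e he
  obtain ⟨k, hk, rfl⟩ := List.mem_map.mp (hperm.mem_iff.mp he)
  rcases hall k hk with rfl | rfl
  · intro hP2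
    have h1 : vv (-(1 : Int), (1 : Int), (1 : Int)) = 1 := by simp [vv, vk, vs]
    have := hP2.1
    omega
  · intro hP2
    exact hP2.2 (by simp [vk])

-- ---- B-side binary search result ----
theorem B_eq (runs : List Int) (numOps m M : Int) (hpos : ∀ k ∈ runs, 1 ≤ k)
    (h2M : 2 ≤ M) (hMm : M ≤ m)
    (hlowP : ∀ L : Int, 2 ≤ L → L < M → ¬ (((natCost runs L.toNat : Nat) : Int) ≤ numOps))
    (hhighP : ∀ L : Int, M ≤ L → L < m → (((natCost runs L.toNat : Nat) : Int) ≤ numOps)) :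
    bisB runs numOps 2 m = M := by
  unfold bisB
  apply bisF_eq runs numOps _ 2 m M (le_refl _) h2M hMm
  · intro L hL1 hL2
    rw [bsum_eq_natCost runs hpos L (by omega)]
    exact hlowP L hL1 hL2
  · intro L hL1 hL2
    rw [bsum_eq_natCost runs hpos L (by omega)]
    exact hhighP L hL1 hL2

-- ---- the main case analysis (loop-entered side) ----
theorem core_unchanged (s : String) (numOps : Int) (hpre : Pre_solve s numOps)
    (hnd : ¬ D_solve s numOps) : solve s numOps = solve_alt s numOps := by
  rw [solve_eq, solve_alt_eq]
  by_cases hbr : min ((cntAux 0 s.toList : Nat) : Int)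
      (PySem.Str.len s - ((cntAux 0 s.toList : Nat) : Int)) ≤ numOps
  · rw [if_pos hbr, if_pos hbr]
  · rw [if_neg hbr, if_neg hbr]
    rw [PySem.Str.len_eq, not_le, lt_min_iff] at hbr
    obtain ⟨hb1, hb2⟩ := hbr
    have hlne : s.toList ≠ [] := by
      intro h0
      rw [h0] at hb2
      simp [cntAux] at hb1 hb2
      exact hpre ⟨String.toList_eq_nil_iff.mp h0, by omega⟩
    have hpos := runLens_pos s.toList
    have hrnil := runLens_ne_nil hlne
    obtain ⟨m, hm⟩ : ∃ m, PySem.List.max? (runLens s.toList) (fun x => x) = some m := by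
      cases hc : PySem.List.max? (runLens s.toList) (fun x => x) with
      | none => exact absurd ((PySem.List.max?_eq_none_iff _ _).mp hc) hrnil
      | some v => exact ⟨v, rfl⟩
    rw [hm]
    simp only [Option.getD_some]
    have hmmem := PySem.List.max?_mem hm
    have hub : ∀ k ∈ runLens s.toList, k ≤ m := PySem.List.max?_isMax hm
    have hm1 : 1 ≤ m := hpos m hmmem
    have hn0 : ((natCost (runLens s.toList) 0 : Nat) : Int) = (s.toList.length : Int) :=
      (natCost_zero_sum _ hpos).trans (runLens_sum s.toList)
    rcases Int.lt_or_le numOps 0 with hneg | hpos0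
    · -- numOps < 0: no iterations; A returns the max run length, B's search never succeeds
      have hfz : numOps.toNat = 0 := Int.toNat_of_nonpos (by omega)
      rw [hfz, A_max s.toList hlne m hmmem hub]
      by_cases hm2 : m ≤ 2
      · rw [if_pos hm2]
      · rw [if_neg hm2]
        exact (B_eq _ numOps m m hpos (by omega) (le_refl m)
          (fun L h1 h2 => by omega) (fun L h1 h2 => by omega)).symm
    · have hfc : ((numOps.toNat : Nat) : Int) = numOps := Int.toNat_of_nonneg hpos0
      have hlow : numOps.toNat < natCost (runLens s.toList) 0 := by omega
      rcases Nat.lt_or_ge numOps.toNat (natCost (runLens s.toList) 1) with hreg | hreg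
      · -- below the split-to-one budget: A's greedy result is the least feasible target
        obtain ⟨M, h2M, hv, hc, hl2⟩ := A_char s.toList numOps.toNat hlne hreg
        rw [hv]
        have hlowN : ∀ L : Nat, L < M → numOps.toNat < natCost (runLens s.toList) L := by
          intro L hL
          exact lt_of_lt_of_le hl2 (natCost_anti _ (by omega))
        have hmz : natCost (runLens s.toList) m.toNat = 0 := natCost_big_zero hpos hub
        have hMm : M ≤ m.toNat := by
          by_contra hcc
          have := hlowN m.toNat (by omega)
          omega
        by_cases hm2 : m ≤ 2
        · rw [if_pos hm2]
          have : M = 2 := by omega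
          have hm2' : m = 2 := by omega
          rw [this, hm2']
          rfl
        · rw [if_neg hm2]
          refine (B_eq _ numOps m (M : Int) hpos (by omega) (by omega) ?_ ?_).symm
          · intro L h1 h2
            have := hlowN L.toNat (by omega)
            omega
          · intro L h1 h2
            have := natCost_anti (runLens s.toList) (L := M) (L' := L.toNat) (by omega)
            omega
      · -- regime: the budget covers splitting everything to ≤ 1
        have hDbridge : ¬ (min (dCnt s) ((s.toList.length : Int) - dCnt s) ≤ numOps) := by
          rw [dCnt_eq]
          omega
        have ht1 : (∀ k ∈ dRuns s.toList, k = 1 ∨ k = 3) ↔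
            (∀ q ∈ runLens s.toList, q = 1 ∨ q = 3) := by
          rw [dRuns_eq]
          constructor
          · intro h q hq
            have hqp := hpos q hq
            have := h q.toNat (List.mem_map_of_mem hq)
            omega
          · intro h k hk
            obtain ⟨q, hq, rfl⟩ := List.mem_map.mp hk
            rcases h q hq with rfl | rfl <;> simp
        by_cases hall : ∀ q ∈ runLens s.toList, q = 1 ∨ q = 3
        · by_cases h3m : (3 : Int) ∈ runLens s.toList
          · -- this is exactly D: contradiction
            exfalso
            apply hnd
            refine ⟨hDbridge, ht1.mpr hall, ?_, ?_⟩
            · rw [dRuns_eq]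
              exact List.mem_map.mpr ⟨3, h3m, rfl⟩
            · rw [dRuns_eq, count3_toNat _ hpos]
              have := natCost13_count _ hall 1 (Or.inl rfl)
              omega
          · -- all runs have length 1
            have hall1 : ∀ q ∈ runLens s.toList, q = 1 := by
              intro q hq
              rcases hall q hq with rfl | rfl
              · rfl
              · exact absurd hq h3m
            have hm1' : m = 1 := hall1 m hmmem
            rw [A_one s.toList numOps.toNat hlne hreg hlow hall]
            rw [if_pos (by omega)]
            omega
        · -- some run length outside {1,3}: both sides give 2
          push_neg at hall
          obtain ⟨k, hk, hknot⟩ := hall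
          have hk13 : k ≠ 1 ∧ k ≠ 3 := by
            constructor <;> intro hcc <;> subst hcc <;> simp at hknot
          have hkpos := hpos k hk
          rw [A_two s.toList numOps.toNat hlne hreg ⟨k, hk, hk13⟩]
          have hk2 : 2 ≤ k := by omega
          have hm2' : 2 ≤ m := le_trans hk2 (hub k hk)
          by_cases hm2 : m ≤ 2
          · rw [if_pos hm2]
            omega
          · rw [if_neg hm2]
            refine (B_eq _ numOps m 2 hpos (le_refl 2) (by omega) ?_ ?_).symm
            · intro L h1 h2
              omega
            · intro L h1 h2
              have := natCost_anti (runLens s.toList) (L := 1) (L' := L.toNat) (by omega)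
              omega

theorem core_changed (s : String) (numOps : Int) (hpre : Pre_solve s numOps)
    (hD : D_solve s numOps) : solve s numOps = 1 ∧ solve_alt s numOps = 2 := by
  obtain ⟨hD1, hD2, hD3, hD4⟩ := hD
  rw [solve_eq, solve_alt_eq]
  have hbr : ¬ (min ((cntAux 0 s.toList : Nat) : Int)
      (PySem.Str.len s - ((cntAux 0 s.toList : Nat) : Int)) ≤ numOps) := by
    rw [dCnt_eq] at hD1
    rw [PySem.Str.len_eq]
    exact hD1
  rw [if_neg hbr, if_neg hbr]
  rw [PySem.Str.len_eq, not_le, lt_min_iff] at hbr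
  obtain ⟨hb1, hb2⟩ := hbr
  have hlne : s.toList ≠ [] := by
    intro h0
    rw [h0] at hb2
    simp [cntAux] at hb1 hb2
    exact hpre ⟨String.toList_eq_nil_iff.mp h0, by omega⟩
  have hpos := runLens_pos s.toList
  have hrnil := runLens_ne_nil hlne
  obtain ⟨m, hm⟩ : ∃ m, PySem.List.max? (runLens s.toList) (fun x => x) = some m := by
    cases hc : PySem.List.max? (runLens s.toList) (fun x => x) with
    | none => exact absurd ((PySem.List.max?_eq_none_iff _ _).mp hc) hrnil
    | some v => exact ⟨v, rfl⟩
  rw [hm]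
  simp only [Option.getD_some]
  have hmmem := PySem.List.max?_mem hm
  have hub : ∀ k ∈ runLens s.toList, k ≤ m := PySem.List.max?_isMax hm
  -- translate D's components to the ports' run lengths
  have hall : ∀ q ∈ runLens s.toList, q = 1 ∨ q = 3 := by
    intro q hq
    have hqp := hpos q hq
    rw [dRuns_eq] at hD2
    have := hD2 q.toNat (List.mem_map_of_mem hq)
    omega
  have h3m : (3 : Int) ∈ runLens s.toList := by
    rw [dRuns_eq] at hD3
    obtain ⟨q, hq, hq3⟩ := List.mem_map.mp hD3
    have hqp := hpos q hq
    have : q = 3 := by omega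
    rwa [this] at hq
  have hcnt3 : ((runLens s.toList).count 3 : Int) ≤ numOps := by
    rw [dRuns_eq, count3_toNat _ hpos] at hD4
    exact hD4
  have hcpos : 0 < (runLens s.toList).count 3 := List.count_pos_iff.mpr h3m
  have hpos0 : (0 : Int) ≤ numOps := by omega
  have hfc : ((numOps.toNat : Nat) : Int) = numOps := Int.toNat_of_nonneg hpos0
  have hreg : natCost (runLens s.toList) 1 ≤ numOps.toNat := by
    rw [natCost13_count _ hall 1 (Or.inl rfl)]
    omega
  have hn0 : ((natCost (runLens s.toList) 0 : Nat) : Int) = (s.toList.length : Int) :=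
    (natCost_zero_sum _ hpos).trans (runLens_sum s.toList)
  have hlow : numOps.toNat < natCost (runLens s.toList) 0 := by omega
  have hm3 : m = 3 := by
    rcases hall m hmmem with h1 | h1
    · have := hub 3 h3m
      omega
    · exact h1
  constructor
  · exact A_one s.toList numOps.toNat hlne hreg hlow hall
  · rw [hm3]
    rw [if_neg (by omega)]
    refine B_eq _ numOps 3 2 hpos (le_refl 2) (by omega) ?_ ?_
    · intro L h1 h2
      omega
    · intro L h1 h2
      have hL2 : L = 2 := by omega
      subst hL2
      have := natCost13_count (runLens s.toList) hall 2 (Or.inr rfl)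
      have hLt : (2 : Int).toNat = 2 := rfl
      rw [hLt, this]
      omega

-- ===== VERDICT =====
theorem solve_spec : Claim_unchanged_solve := by
  intro s numOps _hdom hpre hnd
  exact core_unchanged s numOps hpre hnd
theorem solve_changed : Claim_changed_solve := by unfold Claim_changed_solve; decide
theorem solve_tight : Claim_exact_solve := by
  intro s numOps _hdom hpre hD
  obtain ⟨h1, h2⟩ := core_changed s numOps hpre hD
  rw [h1, h2]
  decide
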